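-- pv_equiv track=rewrite | github.com/bzerath/Miscellaneous | Gwenaelle/Qwirkle/qwirkle_1.py | check_selection_is_ok
-- ===== SOURCE A (Python) =====
-- def check_selection_is_ok(hand, selection):
--     couleurs = set()
--     formes = set()
--     for numero in selection:
--         formes.add(hand[numero][0])
--         couleurs.add(hand[numero][1])
--     if len(formes) > 1 and len(couleurs) > 1:
--         return False
--     else:
--         return True
-- ===== SOURCE B (Python) =====
-- def check_selection_is_ok(hand, selection):
--     if not selection:
--         return True
--     ref_shape, ref_color = hand[selection[0]]
--     return (all(hand[n][0] == ref_shape for n in selection)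
--             or all(hand[n][1] == ref_color for n in selection))
-- ===== Notes on version B (the rewrite author's own statement) =====
-- stated objective: simpler
-- what changed: Replaces accumulating two sets and comparing their sizes with picking a reference tile and running two short-circuiting all-equal scans over the selection.
import Mathlib
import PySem

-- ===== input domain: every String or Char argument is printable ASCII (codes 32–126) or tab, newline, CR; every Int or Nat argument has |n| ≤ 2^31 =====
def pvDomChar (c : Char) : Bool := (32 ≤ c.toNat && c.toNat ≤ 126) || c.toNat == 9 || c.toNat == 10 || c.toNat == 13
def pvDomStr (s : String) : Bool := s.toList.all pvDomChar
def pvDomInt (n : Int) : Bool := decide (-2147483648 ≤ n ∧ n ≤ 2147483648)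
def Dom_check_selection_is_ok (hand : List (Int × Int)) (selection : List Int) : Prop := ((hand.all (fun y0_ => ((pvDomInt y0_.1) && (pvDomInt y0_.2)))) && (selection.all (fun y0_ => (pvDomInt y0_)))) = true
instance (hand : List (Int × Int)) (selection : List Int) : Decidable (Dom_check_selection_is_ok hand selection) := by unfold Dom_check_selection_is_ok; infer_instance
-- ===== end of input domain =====

-- B replaces A's two accumulated sets + size test by a reference tile and two all-equal scans (simpler decomposition, same O(n) cost).


-- ===== PORT A =====
def check_selection_is_ok (hand : List (Int × Int)) (selection : List Int) : Bool :=
  let st := selection.foldl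
    (fun (p : PySem.Set Int × PySem.Set Int) numero =>
      let t := PySem.List.pyGetD hand numero (0, 0)
      (PySem.Set.add p.1 t.1, PySem.Set.add p.2 t.2))
    (PySem.Set.empty, PySem.Set.empty)
  -- st.1 = formes, st.2 = couleurs
  if PySem.Set.len st.1 > 1 && PySem.Set.len st.2 > 1 then false else true

-- ===== PORT B =====
def check_selection_is_ok_alt (hand : List (Int × Int)) (selection : List Int) : Bool :=
  match selection with
  | [] => true
  | n0 :: _ =>
    let ref := PySem.List.pyGetD hand n0 (0, 0)
    selection.all (fun n => (PySem.List.pyGetD hand n (0, 0)).1 == ref.1) ||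
    selection.all (fun n => (PySem.List.pyGetD hand n (0, 0)).2 == ref.2)

-- ===== PRECONDITION & SPEC =====
-- Pre_ excludes exactly the inputs where A raises IndexError: some index in selection out of range for hand.
def Pre_check_selection_is_ok (hand : List (Int × Int)) (selection : List Int) : Prop :=
  ∀ n ∈ selection, PySem.Raise.InRange hand.length n
instance (hand : List (Int × Int)) (selection : List Int) : Decidable (Pre_check_selection_is_ok hand selection) := by unfold Pre_check_selection_is_ok; infer_instance
def pvWitness_check_selection_is_ok : (List (Int × Int)) × List Int := ([(1, 2), (1, 3)], [0, 1])

def Spec_check_selection_is_ok (hand : List (Int × Int)) (selection : List Int) (out : Bool) : Prop := out = check_selection_is_ok_alt hand selection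
instance (hand : List (Int × Int)) (selection : List Int) (out : Bool) : Decidable (Spec_check_selection_is_ok hand selection out) := by unfold Spec_check_selection_is_ok; infer_instance

-- ===== CLAIM (what is proved, stated in full; the proofs are below) =====
def Claim_equal_check_selection_is_ok : Prop := ∀ (hand : List (Int × Int)) (selection : List Int), Dom_check_selection_is_ok hand selection → Pre_check_selection_is_ok hand selection → Spec_check_selection_is_ok hand selection (check_selection_is_ok hand selection)

-- ===== LEMMAS AND PROOFS =====

-- A's paired fold is the pair of set-updates over the two projected value lists.
theorem pv_fold_pair (hand : List (Int × Int)) (sel : List Int)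
    (f c : PySem.Set Int) :
    sel.foldl
      (fun (p : PySem.Set Int × PySem.Set Int) numero =>
        let t := PySem.List.pyGetD hand numero (0, 0)
        (PySem.Set.add p.1 t.1, PySem.Set.add p.2 t.2)) (f, c)
    = (PySem.Set.update f (sel.map (fun n => (PySem.List.pyGetD hand n (0, 0)).1)),
       PySem.Set.update c (sel.map (fun n => (PySem.List.pyGetD hand n (0, 0)).2))) := by
  induction sel generalizing f c with
  | nil => simp [PySem.Set.update]
  | cons x xs ih => simp [List.foldl, ih, PySem.Set.update_cons]

-- a list of length ≤ 1 has at most one member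
theorem pv_mem_len_le_one {α : Type} {s : List α} (h : s.length ≤ 1)
    {a b : α} (ha : a ∈ s) (hb : b ∈ s) : a = b := by
  match s, h with
  | [], _ => cases ha
  | [z], _ =>
    simp at ha hb; exact ha.trans hb.symm

-- set(x :: l) is a singleton iff every element of l equals x
theorem pv_len_le_one_iff (x : Int) (l : List Int) :
    (PySem.Set.ofList (x :: l) : List Int).length ≤ 1 ↔ ∀ y ∈ l, y = x := by
  constructor
  · intro h y hy
    exact pv_mem_len_le_one h
      ((PySem.Set.mem_ofList _ _).2 (List.mem_cons_of_mem _ hy))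
      ((PySem.Set.mem_ofList _ _).2 (List.mem_cons_self))
  · intro h
    have : PySem.Set.ofList (x :: l) = [x] := by
      show PySem.Set.update (PySem.Set.add PySem.Set.empty x) l = [x]
      have hx : PySem.Set.add PySem.Set.empty x = [x] := rfl
      rw [hx]
      induction l with
      | nil => rfl
      | cons z zs ih =>
        have hz : z = x := h z (by simp)
        subst hz
        rw [PySem.Set.update_cons, PySem.Set.add_of_mem (by simp)]
        exact ih (fun y hy => h y (by simp [hy]))
    simp [this]

-- bridge: "every mapped value equals the head value" as a Bool all-scan
theorem pv_all_iff (g : Int → Int) (x0 : Int) (rest : List Int) :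
    (rest.all (fun n => g n == x0) = true) ↔ ∀ y ∈ rest.map g, y = x0 := by
  simp [List.all_eq_true]

theorem pv_update_empty (xs : List Int) :
    PySem.Set.update PySem.Set.empty xs = PySem.Set.ofList xs := rfl

theorem pv_len_def (s : List Int) : PySem.Set.len s = (s.length : Int) := rfl

-- one projection: A's "this projected set is not larger than a singleton" is B's all-equal scan
theorem pv_head_scan (f : Int → Int) (x0 : Int) (rest : List Int) :
    (!decide (1 < (PySem.Set.ofList (x0 :: rest.map f) : List Int).length))
      = rest.all (fun n => f n == x0) := by
  by_cases hA : ∀ y ∈ rest.map f, y = x0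
  · have h1 := (pv_len_le_one_iff x0 (rest.map f)).2 hA
    have h2 := (pv_all_iff f x0 rest).2 hA
    rw [h2]; simp; omega
  · have h1 : ¬ (PySem.Set.ofList (x0 :: rest.map f) : List Int).length ≤ 1 :=
      fun hle => hA ((pv_len_le_one_iff _ _).1 hle)
    have h2 : rest.all (fun n => f n == x0) = false := by
      rw [Bool.eq_false_iff]
      exact fun hx => hA ((pv_all_iff f x0 rest).1 hx)
    rw [h2]; simp; omega

theorem pv_main (hand : List (Int × Int)) (n0 : Int) (rest : List Int) :
    check_selection_is_ok hand (n0 :: rest) = check_selection_is_ok_alt hand (n0 :: rest) := by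
  have key := pv_fold_pair hand (n0 :: rest) PySem.Set.empty PySem.Set.empty
  simp only [check_selection_is_ok, check_selection_is_ok_alt, key, List.map_cons,
    pv_update_empty, pv_len_def]
  simp
  rw [pv_head_scan (fun n => (PySem.List.pyGetD hand n (0, 0)).1) ((PySem.List.pyGetD hand n0 (0, 0)).1) rest,
      pv_head_scan (fun n => (PySem.List.pyGetD hand n (0, 0)).2) ((PySem.List.pyGetD hand n0 (0, 0)).2) rest]

-- ===== VERDICT (by name: the statement is the Claim_ definition above) =====
theorem check_selection_is_ok_spec : Claim_equal_check_selection_is_ok := by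
  intro hand sel hdom hpre
  unfold Spec_check_selection_is_ok
  cases sel with
  | nil => rfl
  | cons n0 rest => exact pv_main hand n0 rest
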